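-- pv_equiv track=rewrite | github.com/SMehrkanoon/Deep-brain-state-classification-of-MEG-data | data_utils.py | order_arranging
-- ===== SOURCE A (Python) =====
-- def order_arranging(rest_list,mem_list,math_list,motor_list):
--     ordered_list = []
--     for index, (value1, value2, value3, value4) in enumerate(zip(rest_list, mem_list, math_list, motor_list)):
--         ordered_list.append(value1)
--         ordered_list.append(value2)
--         ordered_list.append(value3)
--         ordered_list.append(value4)
--     return ordered_list
-- ===== SOURCE B (Python) =====
-- def order_arranging(rest_list, mem_list, math_list, motor_list):
--     n = min(len(rest_list), len(mem_list), len(math_list), len(motor_list))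
--     ordered = [None] * (4 * n)
--     ordered[0::4] = rest_list[:n]
--     ordered[1::4] = mem_list[:n]
--     ordered[2::4] = math_list[:n]
--     ordered[3::4] = motor_list[:n]
--     return ordered
-- ===== Notes on version B (the rewrite author's own statement) =====
-- stated objective: alternative
-- what changed: B fills the output column-wise: it computes n = min of the four lengths, allocates a 4n buffer, and writes each source list into its own stride-4 lane by slice assignment, instead of A's row-wise per-tuple appends over zip.
import Mathlib
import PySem

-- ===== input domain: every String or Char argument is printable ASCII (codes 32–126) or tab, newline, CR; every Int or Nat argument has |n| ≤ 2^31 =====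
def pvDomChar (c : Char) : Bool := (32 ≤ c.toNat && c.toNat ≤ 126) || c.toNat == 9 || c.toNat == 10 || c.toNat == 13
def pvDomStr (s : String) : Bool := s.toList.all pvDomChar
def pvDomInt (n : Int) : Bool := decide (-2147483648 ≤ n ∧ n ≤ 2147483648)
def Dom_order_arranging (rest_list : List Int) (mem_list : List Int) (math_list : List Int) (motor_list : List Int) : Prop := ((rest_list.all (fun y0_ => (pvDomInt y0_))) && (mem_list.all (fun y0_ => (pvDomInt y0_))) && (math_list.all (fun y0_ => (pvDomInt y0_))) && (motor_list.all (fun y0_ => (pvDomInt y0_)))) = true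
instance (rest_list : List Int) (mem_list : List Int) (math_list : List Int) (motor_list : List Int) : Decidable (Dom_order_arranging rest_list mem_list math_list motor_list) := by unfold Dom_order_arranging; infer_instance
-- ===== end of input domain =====

-- B interleaves column-wise: four strided writes into a pre-allocated buffer, instead of A's
-- row-wise element-by-element appends over zip; objective: alternative decomposition.

-- ===== PORT A =====
-- zip(r,m,ma,mo) modelled as nested pairs (((v1,v2),v3),v4); the unused enumerate index kept.
def order_arranging (rest_list : List Int) (mem_list : List Int) (math_list : List Int) (motor_list : List Int) : List Int :=
  (PySem.List.enumerate (((rest_list.zip mem_list).zip math_list).zip motor_list)).foldl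
    (fun acc p =>
      (((acc ++ [p.2.1.1.1]) ++ [p.2.1.1.2]) ++ [p.2.1.2]) ++ [p.2.2]) []

-- ===== PORT B =====
-- 'ordered[off::4] = lane' : walk the lane, writing each element at off, off+4, off+8, …
def pvWriteStride : List Int → Nat → List Int → List Int
  | arr, _, [] => arr
  | arr, off, x :: xs => pvWriteStride (arr.set off x) (off + 4) xs

-- the [None]*(4*n) buffer is rendered as replicate with placeholder 0: every slot is overwritten.
def order_arranging_alt (rest_list : List Int) (mem_list : List Int) (math_list : List Int) (motor_list : List Int) : List Int :=
  let n := min (min rest_list.length mem_list.length) (min math_list.length motor_list.length)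
  let ordered := List.replicate (4 * n) 0
  pvWriteStride
    (pvWriteStride
      (pvWriteStride
        (pvWriteStride ordered 0 (rest_list.take n))
        1 (mem_list.take n))
      2 (math_list.take n))
    3 (motor_list.take n)

-- ===== PRECONDITION & SPEC =====
def Spec_order_arranging (rest_list : List Int) (mem_list : List Int) (math_list : List Int) (motor_list : List Int) (out : List Int) : Prop := out = order_arranging_alt rest_list mem_list math_list motor_list
instance (rest_list : List Int) (mem_list : List Int) (math_list : List Int) (motor_list : List Int) (out : List Int) : Decidable (Spec_order_arranging rest_list mem_list math_list motor_list out) := by unfold Spec_order_arranging; infer_instance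

-- ===== CLAIM (what is proved, stated in full; the proofs are below) =====
def Claim_equal_order_arranging : Prop := ∀ (rest_list : List Int) (mem_list : List Int) (math_list : List Int) (motor_list : List Int), Dom_order_arranging rest_list mem_list math_list motor_list → Spec_order_arranging rest_list mem_list math_list motor_list (order_arranging rest_list mem_list math_list motor_list)

-- ===== LEMMAS AND PROOFS =====

/-- Reference interleaving by simultaneous structural recursion. -/
def pvIl : List Int → List Int → List Int → List Int → List Int
  | a :: as, b :: bs, c :: cs, d :: ds => a :: b :: c :: d :: pvIl as bs cs ds
  | _, _, _, _ => []

lemma pvSet4 (y1 y2 y3 y4 x : Int) (rest : List Int) (off : Nat) :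
    (y1 :: y2 :: y3 :: y4 :: rest).set (off + 4) x = y1 :: y2 :: y3 :: y4 :: rest.set off x := by
  simp [List.set]

lemma pvWriteStride_cons4 (xs : List Int) : ∀ (off : Nat) (rest : List Int) (y1 y2 y3 y4 : Int),
    pvWriteStride (y1 :: y2 :: y3 :: y4 :: rest) (off + 4) xs
      = y1 :: y2 :: y3 :: y4 :: pvWriteStride rest off xs := by
  induction xs with
  | nil => intro off rest y1 y2 y3 y4; simp [pvWriteStride]
  | cons x xt ih =>
      intro off rest y1 y2 y3 y4
      show pvWriteStride ((y1 :: y2 :: y3 :: y4 :: rest).set (off + 4) x) (off + 4 + 4) xt = _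
      rw [pvSet4]
      rw [show off + 4 + 4 = (off + 4) + 4 from rfl, ih (off + 4)]
      rfl

lemma pvA_eq_il : ∀ (r m ma mo : List Int) (acc : List Int) (s : Int),
    (PySem.List.enumerate (((r.zip m).zip ma).zip mo) s).foldl
      (fun acc p => (((acc ++ [p.2.1.1.1]) ++ [p.2.1.1.2]) ++ [p.2.1.2]) ++ [p.2.2]) acc
      = acc ++ pvIl r m ma mo := by
  intro r
  induction r with
  | nil => intro m ma mo acc s; simp [pvIl]
  | cons a as ih =>
      intro m ma mo acc s
      cases m with
      | nil => simp [pvIl]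
      | cons b bs =>
        cases ma with
        | nil => simp [pvIl]
        | cons c cs =>
          cases mo with
          | nil => simp [pvIl]
          | cons d ds =>
            simp only [List.zip_cons_cons, PySem.List.enumerate_cons, List.foldl_cons]
            rw [ih]
            simp [pvIl]

lemma pvW0 (y1 y2 y3 y4 x : Int) (rest : List Int) (xs : List Int) :
    pvWriteStride (y1 :: y2 :: y3 :: y4 :: rest) 0 (x :: xs)
      = x :: y2 :: y3 :: y4 :: pvWriteStride rest 0 xs := by
  show pvWriteStride ((y1 :: y2 :: y3 :: y4 :: rest).set 0 x) (0 + 4) xs = _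
  exact pvWriteStride_cons4 xs 0 rest x y2 y3 y4

lemma pvW1 (y1 y2 y3 y4 x : Int) (rest : List Int) (xs : List Int) :
    pvWriteStride (y1 :: y2 :: y3 :: y4 :: rest) 1 (x :: xs)
      = y1 :: x :: y3 :: y4 :: pvWriteStride rest 1 xs := by
  show pvWriteStride ((y1 :: y2 :: y3 :: y4 :: rest).set 1 x) (1 + 4) xs = _
  exact pvWriteStride_cons4 xs 1 rest y1 x y3 y4

lemma pvW2 (y1 y2 y3 y4 x : Int) (rest : List Int) (xs : List Int) :
    pvWriteStride (y1 :: y2 :: y3 :: y4 :: rest) 2 (x :: xs)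
      = y1 :: y2 :: x :: y4 :: pvWriteStride rest 2 xs := by
  show pvWriteStride ((y1 :: y2 :: y3 :: y4 :: rest).set 2 x) (2 + 4) xs = _
  exact pvWriteStride_cons4 xs 2 rest y1 y2 x y4

lemma pvW3 (y1 y2 y3 y4 x : Int) (rest : List Int) (xs : List Int) :
    pvWriteStride (y1 :: y2 :: y3 :: y4 :: rest) 3 (x :: xs)
      = y1 :: y2 :: y3 :: x :: pvWriteStride rest 3 xs := by
  show pvWriteStride ((y1 :: y2 :: y3 :: y4 :: rest).set 3 x) (3 + 4) xs = _
  exact pvWriteStride_cons4 xs 3 rest y1 y2 y3 x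

/-- n = min of the four lengths, as B computes it. -/
def pvMin4 (as bs cs ds : List Int) : Nat :=
  min (min as.length bs.length) (min cs.length ds.length)

lemma pvCore : ∀ (r m ma mo : List Int),
    pvWriteStride (pvWriteStride (pvWriteStride
        (pvWriteStride (List.replicate (4 * pvMin4 r m ma mo) 0) 0 (r.take (pvMin4 r m ma mo)))
        1 (m.take (pvMin4 r m ma mo)))
      2 (ma.take (pvMin4 r m ma mo)))
      3 (mo.take (pvMin4 r m ma mo))
      = pvIl r m ma mo := by
  intro r
  induction r with
  | nil => intro m ma mo; simp [pvMin4, pvIl, pvWriteStride]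
  | cons a as ih =>
      intro m ma mo
      cases m with
      | nil => simp [pvMin4, pvIl, pvWriteStride]
      | cons b bs =>
        cases ma with
        | nil => simp [pvMin4, pvIl, pvWriteStride]
        | cons c cs =>
          cases mo with
          | nil => simp [pvMin4, pvIl, pvWriteStride]
          | cons d ds =>
            have hmin : pvMin4 (a :: as) (b :: bs) (c :: cs) (d :: ds) = pvMin4 as bs cs ds + 1 := by
              simp [pvMin4, Nat.succ_min_succ]
            have hrl : List.replicate (4 * (pvMin4 as bs cs ds + 1)) (0 : Int)
                = 0 :: 0 :: 0 :: 0 :: List.replicate (4 * pvMin4 as bs cs ds) 0 := by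
              rw [show 4 * (pvMin4 as bs cs ds + 1)
                    = (4 * pvMin4 as bs cs ds).succ.succ.succ.succ by omega]
              simp [List.replicate_succ]
            rw [hmin, hrl]
            simp only [List.take_succ_cons]
            rw [pvW0, pvW1, pvW2, pvW3, ih bs cs ds]
            simp [pvIl]

lemma pvB_eq_il (r m ma mo : List Int) :
    order_arranging_alt r m ma mo = pvIl r m ma mo := by
  simp only [order_arranging_alt]
  exact pvCore r m ma mo

-- ===== VERDICT (by name: the statement is the Claim_ definition above) =====
theorem order_arranging_spec : Claim_equal_order_arranging := by
  intro r m ma mo _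
  unfold Spec_order_arranging order_arranging
  rw [pvB_eq_il]
  simpa using pvA_eq_il r m ma mo [] 0
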